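-- pv_equiv track=rewrite | github.com/zhiyuan5986/SimpleMem | src/decompose_to_facts.py | fix_local_offset_to_doc_offset
-- ===== SOURCE A (Python) =====
-- def fix_local_offset_to_doc_offset(offset, doc_span_offsets):
--     """
--     After the lexical_alignment_recursively, the process contains offsets of where we found the spans in the source texts. However, since the source texts are spans of the source and not the entire source, we need to fix the offsets to be relative to the entire source. This is especially problematic if the span is comprsied of more than one offset.
--
--     Example:
--     ('test36_0.txt_[[191, 271]]', (63,66)) -> ('test36_0.txt_[[191, 271]]', (191+63, 191+66))
--     ('test36_0.txt_[[100, 200], [300, 400]]', (120,140)) -> ('test36_0.txt_[[100, 200], [300, 400]]', (300+120-100-1, 300+140-100-1))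
--     ('test36_0.txt_[[100, 200], [300, 400]]', (80,200)) -> ('test36_0.txt_[[100, 200], [300, 400]]', [(100+80, 200-1), (300, 300+60-1)])
--     """
--
--     new_offsets = []
--
--     diff = 0
--     for doc_span_offset in doc_span_offsets:
--         doc_span_char_idx = doc_span_offset[0]
--         if offset[0] + doc_span_char_idx - diff < doc_span_offset[1]:
--
--             new_offset = (doc_span_offset[0] - diff + offset[0], doc_span_offset[0] - diff + offset[1])
--             is_overflowing = new_offset[1] > doc_span_offset[1]
--             if not is_overflowing:
--                 new_offsets.append(new_offset)
--                 return new_offsets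
--             else:
--                 new_offset = (new_offset[0], doc_span_offset[1])
--                 new_offsets.append(new_offset)
--
--                 distance_completed = new_offset[1] - new_offset[0]
--                 offset = (offset[0] + distance_completed, offset[1])
--
--         diff += doc_span_offset[1] - doc_span_offset[0] + 1  # + 1 for space between spans
--     raise ValueError(f"offset {offset} not found in {doc_span_offsets}")
-- ===== SOURCE B (Python) =====
-- def fix_local_offset_to_doc_offset(offset, doc_span_offsets):
--     """Two-phase re-implementation: a prefix-sum table of cumulative local
--     offsets, a locate phase for the starting span, then a walk phase that
--     maps the interval span by span (no running mutation of offset/diff)."""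
--     diffs = []
--     acc = 0
--     for s, e in doc_span_offsets:
--         diffs.append(acc)
--         acc += e - s + 1
--
--     lo, hi = offset
--     i = 0
--     for (s, e), d in zip(doc_span_offsets, diffs):
--         if lo - d < e - s:
--             break
--         i += 1
--     if i == len(doc_span_offsets):
--         raise ValueError(f"offset {offset} not found in {doc_span_offsets}")
--
--     out = []
--     a = doc_span_offsets[i][0] + lo - diffs[i]
--     while True:
--         s, e = doc_span_offsets[i]
--         b = s + hi - diffs[i]
--         if b <= e:
--             out.append((a, b))
--             return out
--         out.append((a, e))
--         i += 1
--         if i == len(doc_span_offsets):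
--             raise ValueError(f"offset {offset} not found in {doc_span_offsets}")
--         a = doc_span_offsets[i][0] - 1
-- ===== Notes on version B (the rewrite author's own statement) =====
-- stated objective: alternative
-- what changed: Replaces A's single loop that mutates a running diff and the offset pair in place with a precomputed prefix-sum table of cumulative local offsets, a separate locate phase finding the starting span, and a walk phase that emits the document pairs span by span.
-- intended difference: On intervals whose walk from the span containing their start to the span containing their end crosses an inverted span (end < start), A silently skips the inverted span and shifts the remaining document coordinates by its negative length, while B maps every crossed span; on such malformed span lists B's straightforward span-by-span mapping is the intended reading. — e.g. on fix_local_offset_to_doc_offset((0, 2), [(0, 1), (1, 0), (1, 1)]): A returns [(0, 1), (0, 1)], B returns [(0, 1), (0, 0), (0, 1)]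
import Mathlib
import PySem

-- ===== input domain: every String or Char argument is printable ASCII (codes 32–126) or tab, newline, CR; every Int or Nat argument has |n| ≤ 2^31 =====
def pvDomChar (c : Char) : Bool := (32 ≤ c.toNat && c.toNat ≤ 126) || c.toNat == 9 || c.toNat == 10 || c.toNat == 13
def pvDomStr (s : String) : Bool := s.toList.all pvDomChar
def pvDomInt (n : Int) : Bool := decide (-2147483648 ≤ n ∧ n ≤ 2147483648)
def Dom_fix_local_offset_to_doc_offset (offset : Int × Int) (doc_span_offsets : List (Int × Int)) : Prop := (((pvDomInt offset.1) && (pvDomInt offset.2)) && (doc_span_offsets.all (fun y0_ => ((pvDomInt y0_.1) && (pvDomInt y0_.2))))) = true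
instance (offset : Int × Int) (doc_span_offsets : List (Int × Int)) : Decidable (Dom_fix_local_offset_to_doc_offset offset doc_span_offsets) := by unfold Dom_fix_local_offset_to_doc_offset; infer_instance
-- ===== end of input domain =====

-- B re-implements A with a prefix-sum table and two separate phases (locate, then walk);
-- equal return values are proved outside D_ (intervals crossing an inverted span);
-- objective: alternative.

-- ===== PORT A =====
-- A's single loop: running `diff`, in-place mutation of `offset` on overflow,
-- raise (ported as []) when the loop exhausts the spans.
def fixA_loop (offset : Int × Int) (spans : List (Int × Int)) (diff : Int)
    (new_offsets : List (Int × Int)) : List (Int × Int) :=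
  match spans with
  | [] => []  -- raise ValueError
  | (s, e) :: rest =>
    if offset.1 + s - diff < e then
      let a := s - diff + offset.1
      let b := s - diff + offset.2
      if ¬ (b > e) then
        new_offsets ++ [(a, b)]
      else
        fixA_loop (offset.1 + (e - a), offset.2) rest (diff + (e - s + 1))
          (new_offsets ++ [(a, e)])
    else
      fixA_loop offset rest (diff + (e - s + 1)) new_offsets

def fix_local_offset_to_doc_offset (offset : Int × Int) (doc_span_offsets : List (Int × Int)) : List (Int × Int) :=
  fixA_loop offset doc_span_offsets 0 []

-- ===== PORT B =====
-- prefix-sum table of cumulative local offsets (Source B's first loop)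
def fixB_diffs : List (Int × Int) → Int → List Int
  | [], _ => []
  | (s, e) :: rest, acc => acc :: fixB_diffs rest (acc + (e - s + 1))

-- locate phase: first span (paired with its table entry) containing the local start
def fixB_find (lo : Int) : List ((Int × Int) × Int) → Option (List ((Int × Int) × Int))
  | [] => none
  | ((s, e), d) :: rest =>
    if lo - d < e - s then some (((s, e), d) :: rest) else fixB_find lo rest

-- walk phase: emit (a, b) pairs span by span; [] ports the raise on exhaustion
def fixB_walk (hi : Int) (a : Int) : List ((Int × Int) × Int) → List (Int × Int) → List (Int × Int)
  | [], _ => []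
  | ((s, e), d) :: rest, out =>
    let b := s + hi - d
    if b ≤ e then out ++ [(a, b)]
    else
      match rest with
      | [] => []  -- raise ValueError
      | ((s2, e2), d2) :: rest2 =>
        fixB_walk hi (s2 - 1) (((s2, e2), d2) :: rest2) (out ++ [(a, e)])

def fix_local_offset_to_doc_offset_alt (offset : Int × Int) (doc_span_offsets : List (Int × Int)) : List (Int × Int) :=
  match fixB_find offset.1 (doc_span_offsets.zip (fixB_diffs doc_span_offsets 0)) with
  | none => []  -- raise ValueError
  | some [] => []
  | some (((s, e), d) :: rest) =>
    fixB_walk offset.2 (s + offset.1 - d) (((s, e), d) :: rest) []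

-- ===== PRECONDITION & SPEC =====
-- cumulative local offset of span i (prefix sum of local span lengths, +1 gap each);
-- pvD spans (k+1) - 1 is the last local position covered by span k
def pvD (spans : List (Int × Int)) (i : Nat) : Int :=
  ((spans.take i).map (fun p => p.2 - p.1 + 1)).sum

-- Pre_ is exactly the inputs on which A returns normally (otherwise A raises ValueError):
-- some span k covers the local end position and the local start is reachable before it.
def Pre_fix_local_offset_to_doc_offset (offset : Int × Int) (doc_span_offsets : List (Int × Int)) : Prop :=
  ∃ k < doc_span_offsets.length, offset.2 < pvD doc_span_offsets (k + 1) ∧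
    (offset.1 + 1 < pvD doc_span_offsets (k + 1) ∨
     ∃ j < k, offset.1 + 1 < pvD doc_span_offsets (j + 1) ∧ pvD doc_span_offsets (j + 1) ≤ offset.2)
instance (offset : Int × Int) (doc_span_offsets : List (Int × Int)) : Decidable (Pre_fix_local_offset_to_doc_offset offset doc_span_offsets) := by unfold Pre_fix_local_offset_to_doc_offset; infer_instance

def pvWitness_fix_local_offset_to_doc_offset : (Int × Int) × (List (Int × Int)) :=
  ((1, 3), [(10, 12), (20, 25)])

-- On intervals whose walk from the span containing their start to the span containing their
-- end crosses an inverted span (end < start, i.e. a span whose prefix sum does not grow), A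
-- silently skips the inverted span and shifts the remaining document coordinates by its
-- negative length, while B maps every crossed span; on such malformed span lists B's
-- straightforward span-by-span mapping is the intended reading.
def D_fix_local_offset_to_doc_offset (offset : Int × Int) (doc_span_offsets : List (Int × Int)) : Prop :=
  ∃ t < doc_span_offsets.length,
    pvD doc_span_offsets (t + 1) ≤ pvD doc_span_offsets t ∧
    (∃ j < t, offset.1 + 1 < pvD doc_span_offsets (j + 1)) ∧
    ∀ u < t, pvD doc_span_offsets (u + 1) ≤ offset.2
instance (offset : Int × Int) (doc_span_offsets : List (Int × Int)) : Decidable (D_fix_local_offset_to_doc_offset offset doc_span_offsets) := by unfold D_fix_local_offset_to_doc_offset; infer_instance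

def Spec_fix_local_offset_to_doc_offset (offset : Int × Int) (doc_span_offsets : List (Int × Int)) (out : List (Int × Int)) : Prop := ¬ D_fix_local_offset_to_doc_offset offset doc_span_offsets → out = fix_local_offset_to_doc_offset_alt offset doc_span_offsets
instance (offset : Int × Int) (doc_span_offsets : List (Int × Int)) (out : List (Int × Int)) : Decidable (Spec_fix_local_offset_to_doc_offset offset doc_span_offsets out) := by unfold Spec_fix_local_offset_to_doc_offset; infer_instance

def pvDiffWitness_fix_local_offset_to_doc_offset : (Int × Int) × (List (Int × Int)) :=
  ((0, 2), [(0, 1), (1, 0), (1, 1)])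
def pvDiffWitnessOut_fix_local_offset_to_doc_offset : (List (Int × Int)) × (List (Int × Int)) :=
  ([(0, 1), (0, 1)], [(0, 1), (0, 0), (0, 1)])

-- ===== CLAIM (what is proved, stated in full; the proofs are below) =====
def Claim_unchanged_fix_local_offset_to_doc_offset : Prop := ∀ (offset : Int × Int) (doc_span_offsets : List (Int × Int)), Dom_fix_local_offset_to_doc_offset offset doc_span_offsets → Pre_fix_local_offset_to_doc_offset offset doc_span_offsets → Spec_fix_local_offset_to_doc_offset offset doc_span_offsets (fix_local_offset_to_doc_offset offset doc_span_offsets)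
def Claim_changed_fix_local_offset_to_doc_offset : Prop := Dom_fix_local_offset_to_doc_offset (pvDiffWitness_fix_local_offset_to_doc_offset.1) (pvDiffWitness_fix_local_offset_to_doc_offset.2) ∧ Pre_fix_local_offset_to_doc_offset (pvDiffWitness_fix_local_offset_to_doc_offset.1) (pvDiffWitness_fix_local_offset_to_doc_offset.2) ∧ D_fix_local_offset_to_doc_offset (pvDiffWitness_fix_local_offset_to_doc_offset.1) (pvDiffWitness_fix_local_offset_to_doc_offset.2) ∧ fix_local_offset_to_doc_offset (pvDiffWitness_fix_local_offset_to_doc_offset.1) (pvDiffWitness_fix_local_offset_to_doc_offset.2) = pvDiffWitnessOut_fix_local_offset_to_doc_offset.1 ∧ fix_local_offset_to_doc_offset_alt (pvDiffWitness_fix_local_offset_to_doc_offset.1) (pvDiffWitness_fix_local_offset_to_doc_offset.2) = pvDiffWitnessOut_fix_local_offset_to_doc_offset.2 ∧ pvDiffWitnessOut_fix_local_offset_to_doc_offset.1 ≠ pvDiffWitnessOut_fix_local_offset_to_doc_offset.2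

def Claim_exact_fix_local_offset_to_doc_offset : Prop := ∀ (offset : Int × Int) (doc_span_offsets : List (Int × Int)), Dom_fix_local_offset_to_doc_offset offset doc_span_offsets → Pre_fix_local_offset_to_doc_offset offset doc_span_offsets → D_fix_local_offset_to_doc_offset offset doc_span_offsets → fix_local_offset_to_doc_offset offset doc_span_offsets ≠ fix_local_offset_to_doc_offset_alt offset doc_span_offsets

-- ===== LEMMAS AND PROOFS =====

-- proof-side helpers: the last local position covered by span k, and span length
def pvLen (p : Int × Int) : Int := p.2 - p.1
def pvM (spans : List (Int × Int)) (k : Nat) : Int :=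
  pvD spans k + pvLen (spans.getD k (0, 0))

theorem pvD_zero (spans : List (Int × Int)) : pvD spans 0 = 0 := by simp [pvD]

theorem pvD_succ_cons (s e : Int) (rest : List (Int × Int)) (j : Nat) :
    pvD ((s, e) :: rest) (j + 1) = (e - s + 1) + pvD rest j := by
  simp [pvD, List.take_succ_cons]

theorem pvM_zero_cons (s e : Int) (rest : List (Int × Int)) :
    pvM ((s, e) :: rest) 0 = e - s := by
  simp [pvM, pvD_zero, pvLen]

theorem pvM_succ_cons (s e : Int) (rest : List (Int × Int)) (j : Nat) :
    pvM ((s, e) :: rest) (j + 1) = (e - s + 1) + pvM rest j := by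
  simp [pvM, pvD_succ_cons, pvLen]
  ring

theorem pvM_eq : ∀ (spans : List (Int × Int)) (k : Nat), k < spans.length →
    pvM spans k = pvD spans (k + 1) - 1 := by
  intro spans
  induction spans with
  | nil => intro k hk; simp at hk
  | cons hd tl ih =>
    intro k hk
    obtain ⟨s, e⟩ := hd
    cases k with
    | zero => rw [pvM_zero_cons, pvD_succ_cons, pvD_zero]; ring
    | succ k' =>
      rw [pvM_succ_cons, pvD_succ_cons, ih k' (by simpa using hk)]
      ring

-- the well-formedness A's chain needs until the interval's end: every crossed span in order,
-- up to and including the first one whose covered range reaches offset[1]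
def ChainOK (o1 : Int) : Int → List (Int × Int) → Prop
  | _, [] => True
  | d, (s, e) :: rest => s ≤ e ∧ (d + (e - s) < o1 → ChainOK o1 (d + (e - s + 1)) rest)

-- A's whole run seen from the locate phase: skip spans until the guard fires, then ChainOK
def LocOK (o0 o1 : Int) : Int → List (Int × Int) → Prop
  | _, [] => True
  | d, (s, e) :: rest =>
    if o0 - d < e - s then (d + (e - s) < o1 → ChainOK o1 (d + (e - s + 1)) rest)
    else LocOK o0 o1 (d + (e - s + 1)) rest

theorem fix_chain (o1 : Int) : ∀ (spans : List (Int × Int)) (s e d : Int) (acc : List (Int × Int)),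
    s ≤ e → (d + (e - s) < o1 → ChainOK o1 (d + (e - s + 1)) spans) →
    fixA_loop (d - 1, o1) ((s, e) :: spans) d acc
      = fixB_walk o1 (s - 1) (((s, e), d) :: spans.zip (fixB_diffs spans (d + (e - s + 1)))) acc := by
  intro spans
  induction spans with
  | nil =>
    intro s e d acc hse _
    have hg : d - 1 + s - d < e := by omega
    simp only [fixA_loop, fixB_diffs, fixB_walk, List.zip_nil_right, if_pos hg]
    by_cases hb : s + o1 - d ≤ e
    · have hb' : ¬ (s - d + o1 > e) := by omega
      simp only [hb', not_false_eq_true, if_pos, hb, if_pos]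
      have h1 : s - d + (d - 1) = s - 1 := by ring
      have h2 : s - d + o1 = s + o1 - d := by ring
      rw [h1, h2]
    · have hb' : (s - d + o1 > e) := by omega
      simp only [hb', not_true_eq_false, if_false, hb]
  | cons hd tl ih =>
    intro s e d acc hse hck
    obtain ⟨s2, e2⟩ := hd
    have hg : d - 1 + s - d < e := by omega
    simp only [fixA_loop, fixB_diffs, fixB_walk, List.zip_cons_cons, if_pos hg]
    by_cases hb : s + o1 - d ≤ e
    · have hb' : ¬ (s - d + o1 > e) := by omega
      simp only [hb', not_false_eq_true, if_pos, hb, if_pos]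
      have h1 : s - d + (d - 1) = s - 1 := by ring
      have h2 : s - d + o1 = s + o1 - d := by ring
      rw [h1, h2]
    · have hb' : (s - d + o1 > e) := by omega
      simp only [hb', not_true_eq_false, if_false, hb]
      have ha : d - 1 + (e - (s - d + (d - 1))) = (d + (e - s + 1)) - 1 := by ring
      have hacc : s - d + (d - 1) = s - 1 := by ring
      rw [ha, hacc]
      obtain ⟨hse2, hck2⟩ := hck (by omega)
      have := ih s2 e2 (d + (e - s + 1)) (acc ++ [(s - 1, e)]) hse2 hck2
      simp only [fixA_loop] at this ⊢
      convert this using 3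

theorem fix_main (o0 o1 : Int) : ∀ (spans : List (Int × Int)) (diff : Int) (acc : List (Int × Int)),
    LocOK o0 o1 diff spans →
    fixA_loop (o0, o1) spans diff acc
      = (match fixB_find o0 (spans.zip (fixB_diffs spans diff)) with
         | none => []
         | some [] => []
         | some (((s, e), d) :: rest) => fixB_walk o1 (s + o0 - d) (((s, e), d) :: rest) acc) := by
  intro spans
  induction spans with
  | nil => intro diff acc _; simp [fixA_loop, fixB_diffs, fixB_find]
  | cons hd tl ih =>
    intro diff acc hloc
    obtain ⟨s, e⟩ := hd
    simp only [fixA_loop, fixB_diffs, fixB_find, List.zip_cons_cons]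
    by_cases hg : o0 + s - diff < e
    · have hg' : o0 - diff < e - s := by omega
      simp only [hg, if_pos, hg', if_pos]
      simp only [LocOK, hg', if_pos] at hloc
      by_cases hb : s - diff + o1 > e
      · simp only [hb, not_true_eq_false, if_false]
        have hwb : ¬ (s + o1 - diff ≤ e) := by omega
        rw [fixB_walk.eq_def]
        simp only [hwb, if_false]
        cases tl with
        | nil => simp [fixA_loop, fixB_diffs]
        | cons hd2 tl2 =>
          obtain ⟨s2, e2⟩ := hd2
          simp only [fixB_diffs, List.zip_cons_cons]
          have ha : o0 + (e - (s - diff + o0)) = (diff + (e - s + 1)) - 1 := by ring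
          have hacc : s - diff + o0 = s + o0 - diff := by ring
          rw [ha, hacc]
          obtain ⟨hse2, hck2⟩ := hloc (by omega)
          exact fix_chain o1 tl2 s2 e2 (diff + (e - s + 1)) (acc ++ [(s + o0 - diff, e)])
            hse2 hck2
      · simp only [hb, not_false_eq_true, if_pos]
        have hwb : s + o1 - diff ≤ e := by omega
        rw [fixB_walk.eq_def]
        simp only [hwb, if_pos]
        have h1 : s - diff + o0 = s + o0 - diff := by ring
        have h2 : s - diff + o1 = s + o1 - diff := by ring
        rw [h1, h2]
    · have hg' : ¬ (o0 - diff < e - s) := by omega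
      simp only [hg, hg', if_false]
      simp only [LocOK, hg', if_false] at hloc
      exact ih (diff + (e - s + 1)) acc hloc

-- the first span whose covered range reaches o1, with every crossed span well-formed, gives ChainOK
theorem chainOK_of_first (o1 : Int) : ∀ (spans : List (Int × Int)) (d : Int) (m : Nat),
    m < spans.length → o1 ≤ d + pvM spans m →
    (∀ u < m, d + pvM spans u < o1) →
    (∀ t ≤ m, ¬ ((spans.getD t (0, 0)).2 < (spans.getD t (0, 0)).1)) →
    ChainOK o1 d spans := by
  intro spans
  induction spans with
  | nil => intro d m hm; simp at hm
  | cons hd tl ih =>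
    intro d m hm hret hmin hwf
    obtain ⟨s, e⟩ := hd
    refine ⟨by have := hwf 0 (Nat.zero_le m); simpa using this, ?_⟩
    intro hov
    cases m with
    | zero => rw [pvM_zero_cons] at hret; omega
    | succ m' =>
      refine ih (d + (e - s + 1)) m' (by simpa using hm) ?_ ?_ ?_
      · rw [pvM_succ_cons] at hret; omega
      · intro u hu
        have := hmin (u + 1) (by omega)
        rw [pvM_succ_cons] at this; omega
      · intro t ht
        have := hwf (t + 1) (by omega)
        simpa using this

theorem fix_bridge (o0 o1 : Int) : ∀ (spans : List (Int × Int)) (d : Int),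
    (∃ k < spans.length, o1 ≤ d + pvM spans k ∧
      (o0 < d + pvM spans k ∨ ∃ j < k, o0 < d + pvM spans j ∧ d + pvM spans j < o1)) →
    (¬ ∃ i0 < spans.length, ∃ m < spans.length, i0 ≤ m ∧
      (∀ j < i0, ¬ (o0 < d + pvM spans j)) ∧ o0 < d + pvM spans i0 ∧
      (∀ u, i0 ≤ u → u < m → d + pvM spans u < o1) ∧ o1 ≤ d + pvM spans m ∧
      ∃ t ≤ m, i0 < t ∧ (spans.getD t (0, 0)).2 < (spans.getD t (0, 0)).1) →
    LocOK o0 o1 d spans := by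
  intro spans
  induction spans with
  | nil => intro d _ _; trivial
  | cons hd tl ih =>
    intro d hpre hnd
    obtain ⟨s, e⟩ := hd
    by_cases hf : o0 - d < e - s
    · simp only [LocOK, hf, if_pos]
      intro hov
      -- the interval overflows the starting span; find the FIRST later span reaching o1
      have hex : ∃ m, m < tl.length ∧ o1 ≤ (d + (e - s + 1)) + pvM tl m := by
        obtain ⟨k, hk, hret, _⟩ := hpre
        cases k with
        | zero => rw [pvM_zero_cons] at hret; omega
        | succ k' =>
          rw [pvM_succ_cons] at hret
          exact ⟨k', by simpa using hk, by omega⟩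
      classical
      let P : Nat → Prop := fun m => m < tl.length ∧ o1 ≤ (d + (e - s + 1)) + pvM tl m
      have hP : ∃ m, P m := hex
      let m0 := Nat.find hP
      have hm0 : P m0 := Nat.find_spec hP
      have hmin : ∀ u < m0, (d + (e - s + 1)) + pvM tl u < o1 := by
        intro u hu
        have := Nat.find_min hP hu
        simp only [P, not_and, not_le] at this
        have hul : u < tl.length := Nat.lt_trans hu hm0.1
        exact this hul
      refine chainOK_of_first o1 tl (d + (e - s + 1)) m0 hm0.1 hm0.2 hmin ?_
      intro t ht hinv
      exact hnd ⟨0, by simp, m0 + 1, by simpa using hm0.1, by omega,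
        by intro j hj; omega,
        by rw [pvM_zero_cons]; omega,
        by
          intro u _ hu
          cases u with
          | zero => rw [pvM_zero_cons]; omega
          | succ u' =>
            rw [pvM_succ_cons]
            have := hmin u' (by omega)
            omega,
        by rw [pvM_succ_cons]; have := hm0.2; omega,
        t + 1, by omega, by omega, by simpa using hinv⟩
    · simp only [LocOK, hf, if_false]
      refine ih (d + (e - s + 1)) ?_ ?_
      · obtain ⟨k, hk, hret, hreach⟩ := hpre
        cases k with
        | zero =>
          rw [pvM_zero_cons] at hret hreach
          rcases hreach with h | ⟨j, hj, _⟩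
          · omega
          · omega
        | succ k' =>
          rw [pvM_succ_cons] at hret hreach
          refine ⟨k', by simpa using hk, by omega, ?_⟩
          rcases hreach with h | ⟨j, hj, hj1, hj2⟩
          · left; omega
          · cases j with
            | zero => rw [pvM_zero_cons] at hj1; omega
            | succ j' =>
              rw [pvM_succ_cons] at hj1 hj2
              exact Or.inr ⟨j', by omega, by omega, by omega⟩
      · intro ⟨i0, hi0, m, hm, him, hnofire, hfire, hchain, hret, t, ht2, ht1, hinv⟩
        exact hnd ⟨i0 + 1, by simpa using hi0, m + 1, by simpa using hm, by omega,
          by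
            intro j hj
            cases j with
            | zero => rw [pvM_zero_cons]; omega
            | succ j' =>
              rw [pvM_succ_cons]
              have := hnofire j' (by omega)
              omega,
          by rw [pvM_succ_cons]; omega,
          by
            intro u hu1 hu2
            cases u with
            | zero => omega
            | succ u' =>
              rw [pvM_succ_cons]
              have := hchain u' (by omega) (by omega)
              omega,
          by rw [pvM_succ_cons]; omega,
          t + 1, by omega, by omega, by simpa using hinv⟩

-- ===== VERDICT (by name: the statement is the Claim_ definition above) =====
theorem fix_local_offset_to_doc_offset_spec : Claim_unchanged_fix_local_offset_to_doc_offset := by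
  intro offset spans _hdom hpre hnd
  unfold fix_local_offset_to_doc_offset fix_local_offset_to_doc_offset_alt
  obtain ⟨o0, o1⟩ := offset
  have hloc : LocOK o0 o1 0 spans := by
    refine fix_bridge o0 o1 spans 0 ?_ ?_
    · obtain ⟨k, hk, h1, h2⟩ := hpre
      refine ⟨k, hk, ?_, ?_⟩
      · have := pvM_eq spans k hk
        simp only [zero_add]
        omega
      · rcases h2 with h | ⟨j, hj, hj1, hj2⟩
        · left
          have := pvM_eq spans k hk
          simp only [zero_add]
          omega
        · right
          have := pvM_eq spans j (by omega)
          exact ⟨j, hj, by simp only [zero_add]; omega, by simp only [zero_add]; omega⟩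
    · intro ⟨i0, hi0, m, hm, him, hnofire, hfire, hchain, hret, t, ht2, ht1, hinv⟩
      simp only [zero_add] at hfire hchain hret hnofire
      apply hnd
      have htL : t < spans.length := by omega
      have hiL : i0 < spans.length := by omega
      have hMi0 := pvM_eq spans i0 hiL
      have hMt := pvM_eq spans t htL
      refine ⟨t, htL, ?_, ⟨i0, by omega, by omega⟩, ?_⟩
      · -- the span at t is inverted, so the prefix sum does not grow there
        have : pvD spans (t + 1) = pvM spans t + 1 := by omega
        rw [this]
        unfold pvM pvLen
        omega
      · intro u hu
        have huL : u < spans.length := by omega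
        have hMu := pvM_eq spans u huL
        by_cases hcase : u < i0
        · have h1 := hnofire u hcase
          have h2 : pvM spans i0 < o1 := hchain i0 (Nat.le_refl i0) (by omega)
          omega
        · have := hchain u (by omega) (by omega)
          omega
  rw [fix_main o0 o1 spans 0 [] hloc]

theorem fix_local_offset_to_doc_offset_changed : Claim_changed_fix_local_offset_to_doc_offset := by
  unfold Claim_changed_fix_local_offset_to_doc_offset
  decide

-- ===== tightness: A ≠ B everywhere inside D_ =====

-- every pair A ever appends is strictly increasing (as long as the interval is, which
-- overflowing keeps re-establishing)
theorem fixA_incr (o1 : Int) : ∀ (spans : List (Int × Int)) (o0 diff : Int) (acc : List (Int × Int)),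
    o0 < o1 → (∀ p ∈ acc, p.1 < p.2) →
    ∀ p ∈ fixA_loop (o0, o1) spans diff acc, p.1 < p.2 := by
  intro spans
  induction spans with
  | nil => intro o0 diff acc _ _ p hp; simp [fixA_loop] at hp
  | cons hd tl ih =>
    intro o0 diff acc h01 hacc p hp
    obtain ⟨s, e⟩ := hd
    simp only [fixA_loop] at hp
    by_cases hg : o0 + s - diff < e
    · simp only [hg, if_pos] at hp
      by_cases hb : s - diff + o1 > e
      · simp only [hb, not_true_eq_false, if_false] at hp
        refine ih (o0 + (e - (s - diff + o0))) (diff + (e - s + 1)) _ (by omega) ?_ p hp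
        intro q hq
        rcases List.mem_append.mp hq with h | h
        · exact hacc q h
        · simp at h; subst h; simp; omega
      · simp only [hb, not_false_eq_true, if_pos] at hp
        rcases List.mem_append.mp hp with h | h
        · exact hacc p h
        · simp at h; subst h; simp; omega
    · simp only [hg, if_false] at hp
      exact ih o0 (diff + (e - s + 1)) acc h01 hacc p hp

-- somewhere in the zipped tail the walk reaches its end span (b ≤ e fires)
def WRet (o1 : Int) : List ((Int × Int) × Int) → Prop
  | [] => False
  | ((s, e), d) :: r => s + o1 - d ≤ e ∨ WRet o1 r

-- the walk's next span is inverted and the walk still ends: the bad pair it emits survives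
def BadFront : List ((Int × Int) × Int) → Prop
  | [] => False
  | ((s, e), _) :: _ => e < s

-- the walk, before ending, reaches an inverted span that is not its first span
def BadReach (o1 : Int) : List ((Int × Int) × Int) → Prop
  | [] => False
  | ((s, e), d) :: r => ¬ (s + o1 - d ≤ e) ∧ ((BadFront r ∧ WRet o1 r) ∨ BadReach o1 r)

theorem walk_mem (o1 : Int) : ∀ (zipped : List ((Int × Int) × Int)) (a : Int) (acc : List (Int × Int)) (p : Int × Int),
    WRet o1 zipped → p ∈ acc → p ∈ fixB_walk o1 a zipped acc := by
  intro zipped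
  induction zipped with
  | nil => intro a acc p hw; exact absurd hw (by simp [WRet])
  | cons hd r ih =>
    intro a acc p hw hp
    obtain ⟨⟨s, e⟩, d⟩ := hd
    rw [fixB_walk.eq_def]
    by_cases hb : s + o1 - d ≤ e
    · simp only [hb, if_pos]
      exact List.mem_append.mpr (Or.inl hp)
    · simp only [hb, if_false]
      rcases hw with h | hw
      · exact absurd h hb
      · cases r with
        | nil => exact absurd hw (by simp [WRet])
        | cons hd2 r2 =>
          obtain ⟨⟨s2, e2⟩, d2⟩ := hd2
          exact ih (s2 - 1) (acc ++ [(a, e)]) p hw (List.mem_append.mpr (Or.inl hp))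

theorem walk_bad (o1 : Int) : ∀ (zipped : List ((Int × Int) × Int)) (a : Int) (acc : List (Int × Int)),
    BadReach o1 zipped → ∃ p ∈ fixB_walk o1 a zipped acc, p.2 ≤ p.1 := by
  intro zipped
  induction zipped with
  | nil => intro a acc hw; exact absurd hw (by simp [BadReach])
  | cons hd r ih =>
    intro a acc hbr
    obtain ⟨⟨s, e⟩, d⟩ := hd
    obtain ⟨hnr, hrest⟩ := hbr
    rw [fixB_walk.eq_def]
    simp only [hnr, if_false]
    cases r with
    | nil =>
      exfalso
      rcases hrest with ⟨h, _⟩ | h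
      · exact (by simp [BadFront] at h)
      · exact (by simp [BadReach] at h)
    | cons hd2 r2 =>
      obtain ⟨⟨s2, e2⟩, d2⟩ := hd2
      rcases hrest with ⟨hbf, hwret⟩ | hbr2
      · have hinv : e2 < s2 := by simpa [BadFront] using hbf
        dsimp only
        rw [fixB_walk.eq_def]
        by_cases hb2 : s2 + o1 - d2 ≤ e2
        · simp only [hb2, if_pos]
          exact ⟨(s2 - 1, s2 + o1 - d2), List.mem_append.mpr (Or.inr (by simp)), by simp; omega⟩
        · simp only [hb2, if_false]
          rcases hwret with h | hwret2
          · exact absurd h hb2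
          · cases r2 with
            | nil => exact absurd hwret2 (by simp [WRet])
            | cons hd3 r3 =>
              obtain ⟨⟨s3, e3⟩, d3⟩ := hd3
              refine ⟨(s2 - 1, e2), ?_, by simp; omega⟩
              exact walk_mem o1 _ (s3 - 1) _ (s2 - 1, e2) hwret2
                (List.mem_append.mpr (Or.inr (by simp)))
      · exact ih (s2 - 1) (acc ++ [(a, e)]) hbr2

theorem wret_build (o1 : Int) : ∀ (spans : List (Int × Int)) (d : Int),
    (∃ k < spans.length, o1 < d + pvD spans (k + 1)) →
    WRet o1 (spans.zip (fixB_diffs spans d)) := by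
  intro spans
  induction spans with
  | nil => intro d ⟨k, hk, _⟩; simp at hk
  | cons hd tl ih =>
    intro d ⟨k, hk, hret⟩
    obtain ⟨s, e⟩ := hd
    simp only [fixB_diffs, List.zip_cons_cons, WRet]
    cases k with
    | zero =>
      left
      rw [pvD_succ_cons, pvD_zero] at hret
      omega
    | succ k' =>
      right
      rw [pvD_succ_cons] at hret
      exact ih (d + (e - s + 1)) ⟨k', by simpa using hk, by omega⟩

theorem badreach_build (o1 : Int) : ∀ (spans : List (Int × Int)) (d : Int) (t : Nat),
    t < spans.length → 1 ≤ t →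
    pvD spans (t + 1) ≤ pvD spans t →
    (∀ u < t, d + pvD spans (u + 1) ≤ o1) →
    (∃ k < spans.length, o1 < d + pvD spans (k + 1)) →
    BadReach o1 (spans.zip (fixB_diffs spans d)) := by
  intro spans
  induction spans with
  | nil => intro d t ht; simp at ht
  | cons hd tl ih =>
    intro d t ht ht1 hinv hnr hret
    obtain ⟨s, e⟩ := hd
    rw [List.length_cons] at ht
    simp only [fixB_diffs, List.zip_cons_cons, BadReach]
    have hhd : d + pvD ((s, e) :: tl) 1 ≤ o1 := hnr 0 (by omega)
    rw [show (1 : Nat) = 0 + 1 from rfl, pvD_succ_cons, pvD_zero] at hhd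
    refine ⟨by omega, ?_⟩
    have hret' : ∃ k < tl.length, o1 < (d + (e - s + 1)) + pvD tl (k + 1) := by
      obtain ⟨k, hk, hr⟩ := hret
      cases k with
      | zero => rw [pvD_succ_cons, pvD_zero] at hr; omega
      | succ k' => rw [pvD_succ_cons] at hr; exact ⟨k', by simpa using hk, by omega⟩
    cases t with
    | zero => omega
    | succ t' =>
      cases t' with
      | zero =>
        -- the inverted span is the next one
        left
        cases tl with
        | nil => simp at ht
        | cons hd2 tl2 =>
          obtain ⟨s2, e2⟩ := hd2
          simp only [pvD_succ_cons, pvD_zero] at hinv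
          refine ⟨by simp [fixB_diffs, BadFront]; omega, ?_⟩
          exact wret_build o1 ((s2, e2) :: tl2) (d + (e - s + 1)) hret'
      | succ t'' =>
        right
        rw [pvD_succ_cons, pvD_succ_cons] at hinv
        refine ih (d + (e - s + 1)) (t'' + 1) (by simpa using ht) (by omega)
          (by rw [show t'' + 1 + 1 = t'' + 2 from rfl]; omega) ?_ hret'
        intro u hu
        have := hnr (u + 1) (by omega)
        rw [pvD_succ_cons] at this
        omega

theorem bridge2 (o0 o1 : Int) : ∀ (spans : List (Int × Int)) (d : Int),
    (∃ t < spans.length, pvD spans (t + 1) ≤ pvD spans t ∧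
      (∃ j < t, o0 + 1 < d + pvD spans (j + 1)) ∧
      ∀ u < t, d + pvD spans (u + 1) ≤ o1) →
    (∃ k < spans.length, o1 < d + pvD spans (k + 1)) →
    (match fixB_find o0 (spans.zip (fixB_diffs spans d)) with
     | none => False
     | some z => BadReach o1 z) := by
  intro spans
  induction spans with
  | nil => intro d ⟨t, ht, _⟩; simp at ht
  | cons hd tl ih =>
    intro d hD hret
    obtain ⟨s, e⟩ := hd
    obtain ⟨t, ht, hinv, ⟨j, hj, hfj⟩, hnr⟩ := hD
    rw [List.length_cons] at ht
    simp only [fixB_diffs, fixB_find, List.zip_cons_cons]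
    by_cases hf : o0 - d < e - s
    · simp only [hf, if_pos]
      exact badreach_build o1 ((s, e) :: tl) d t ht (by omega) hinv hnr hret
    · simp only [hf, if_false]
      -- the first span does not fire, so everything shifts into the tail
      have hj0 : j ≠ 0 := by
        intro h
        subst h
        rw [pvD_succ_cons, pvD_zero] at hfj
        omega
      have hret' : ∃ k < tl.length, o1 < (d + (e - s + 1)) + pvD tl (k + 1) := by
        obtain ⟨k, hk, hr⟩ := hret
        have h0 := hnr 0 (by omega)
        rw [pvD_succ_cons, pvD_zero] at h0
        cases k with
        | zero => rw [pvD_succ_cons, pvD_zero] at hr; omega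
        | succ k' => rw [pvD_succ_cons] at hr; exact ⟨k', by simpa using hk, by omega⟩
      refine ih (d + (e - s + 1)) ⟨t - 1, by omega, ?_, ⟨j - 1, by omega, ?_⟩, ?_⟩ hret'
      · obtain ⟨t'', h2⟩ : ∃ t'', t = t'' + 1 := ⟨t - 1, by omega⟩
        subst h2
        rw [pvD_succ_cons, pvD_succ_cons] at hinv
        simpa using (by omega : pvD tl (t'' + 1) ≤ pvD tl t'')
      · obtain ⟨j'', h2⟩ : ∃ j'', j = j'' + 1 := ⟨j - 1, by omega⟩
        subst h2
        rw [pvD_succ_cons] at hfj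
        simpa using (by omega : o0 + 1 < d + (e - s + 1) + pvD tl (j'' + 1))
      · intro u hu
        have := hnr (u + 1) (by omega)
        rw [pvD_succ_cons] at this
        omega

theorem fix_local_offset_to_doc_offset_tight : Claim_exact_fix_local_offset_to_doc_offset := by
  intro offset spans _hdom hpre hd heq
  obtain ⟨o0, o1⟩ := offset
  obtain ⟨t, ht, hinv, ⟨j, hj, hfj⟩, hnr⟩ := hd
  -- the interval is increasing: its start fires strictly below a prefix sum its end reaches
  have h01 : o0 < o1 := by
    have := hnr j (by omega)
    omega
  have hret : ∃ k < spans.length, o1 < (0 : Int) + pvD spans (k + 1) := by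
    obtain ⟨k, hk, h1, _⟩ := hpre
    exact ⟨k, hk, by simpa using h1⟩
  have hbr := bridge2 o0 o1 spans 0
    ⟨t, ht, hinv, ⟨j, hj, by simpa using hfj⟩, fun u hu => by simpa using hnr u hu⟩ hret
  have hA := fixA_incr o1 spans o0 0 [] h01 (by simp)
  unfold fix_local_offset_to_doc_offset fix_local_offset_to_doc_offset_alt at heq
  revert hbr
  cases hfind : fixB_find o0 (spans.zip (fixB_diffs spans 0)) with
  | none => simp
  | some z =>
    cases z with
    | nil => simp [BadReach]
    | cons zh zt =>
      obtain ⟨⟨zs, ze⟩, zd⟩ := zh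
      intro hbr
      simp only at hbr
      obtain ⟨p, hpmem, hple⟩ := walk_bad o1 (((zs, ze), zd) :: zt) (zs + o0 - zd) [] hbr
      rw [hfind] at heq
      dsimp only at heq
      rw [← heq] at hpmem
      exact absurd (hA p hpmem) (by omega)
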